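-- pv_equiv track=rewrite | github.com/TuLe142857/PYTHON | codeptit/SoTangGiam.py | check
-- ===== SOURCE A (Python) =====
-- import math
--
-- def check(n):
-- 	# duyet tu phai sang trai
-- 	#status = 1 tang
-- 	#status = -1
-- 	status = 1
--
-- 	if((int(math.log(n, 10)) + 1) < 3):
-- 		return False
-- 	last = n % 10
-- 	n //= 10
--
-- 	# tang dan
-- 	while(n != 0 and status == 1):
-- 		if(not(last - (n%10) < 0)):
-- 			status = -1
-- 			break
-- 		last = n%10
-- 		n //= 10
--
-- 	# giam dan
-- 	while(n != 0 and status == -1):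
-- 		if(not (last - (n%10) > 0 )):
-- 			return False
-- 		last = n%10
-- 		n //= 10
-- 	return True
-- ===== SOURCE B (Python) =====
-- def check(n):
--     # A's math.log guard is, for every positive n, exactly "fewer than 3 digits";
--     # (on n <= 0 A raises ValueError from math.log; here we just return False).
--     if n < 100:
--         return False
--     d = [int(c) for c in str(n)]
--     # climb the strictly increasing prefix (left to right; A scans right to left)
--     i = 0
--     while i + 1 < len(d) and d[i] < d[i + 1]:
--         i += 1
--     # the rest must be strictly decreasing
--     return all(d[j] > d[j + 1] for j in range(i, len(d) - 1))
-- ===== Notes on version B (the rewrite author's own statement) =====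
-- stated objective: idiomatic
-- what changed: B converts n to its decimal string and scans the digit list left-to-right (climb the strictly increasing prefix, then require a strictly decreasing rest), instead of A's right-to-left divmod loop with a status flag; A's math.log digit-count guard becomes the equivalent plain fewer-than-three-digits comparison.
-- outside the precondition, e.g. on check(0): A raises ValueError, B returns False
import Mathlib
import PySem

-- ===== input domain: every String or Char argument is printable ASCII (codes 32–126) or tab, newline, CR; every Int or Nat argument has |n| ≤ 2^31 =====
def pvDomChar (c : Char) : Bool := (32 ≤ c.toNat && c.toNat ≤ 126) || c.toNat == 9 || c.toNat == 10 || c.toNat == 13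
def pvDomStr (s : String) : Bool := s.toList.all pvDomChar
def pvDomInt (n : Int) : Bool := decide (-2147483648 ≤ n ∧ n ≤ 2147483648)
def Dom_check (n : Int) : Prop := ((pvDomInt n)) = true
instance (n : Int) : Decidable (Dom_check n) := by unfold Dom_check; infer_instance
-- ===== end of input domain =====

-- B rewrites A's right-to-left divmod scan as a left-to-right scan of the decimal digit list
-- (climb the strictly increasing prefix, then require a strictly decreasing rest): idiomatic.

-- ===== PORT A =====
-- first while loop: scan right-to-left while strictly "increasing"; returns (status, last, n)
def checkPhase1 : Nat → Int → Int → Int × Int × Int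
  | 0, last, n => (1, last, n)
  | fuel+1, last, n =>
    if n ≠ 0 then
      if ¬(last - PySem.Int.mod n 10 < 0) then (-1, last, n)
      else checkPhase1 fuel (PySem.Int.mod n 10) (PySem.Int.floordiv n 10)
    else (1, last, n)

-- second while loop: the remaining digits must be strictly "decreasing"
def checkPhase2 : Nat → Int → Int → Bool
  | 0, _, _ => true
  | fuel+1, last, n =>
    if n ≠ 0 then
      if ¬(last - PySem.Int.mod n 10 > 0) then false
      else checkPhase2 fuel (PySem.Int.mod n 10) (PySem.Int.floordiv n 10)
    else true

def check (n : Int) : Bool :=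
  -- guard `int(math.log(n, 10)) + 1 < 3`: math.log has no PySem port; log is monotone and in
  -- CPython int(math.log(99,10))+1 = 2 while int(math.log(100,10))+1 = 3, so for every n ≥ 1
  -- (= Pre_check, where math.log returns) the guard is exactly n < 100.
  if n < 100 then false
  else
    let last := PySem.Int.mod n 10
    let n1 := PySem.Int.floordiv n 10
    let r := checkPhase1 (n.natAbs + 1) last n1     -- fuel: one digit is consumed per step
    if r.1 = -1 then checkPhase2 (n.natAbs + 1) r.2.1 r.2.2 else true

-- ===== PORT B =====
-- d = [int(c) for c in str(n)]; int(c) on the digit characters produced by str of a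
-- nonnegative int is exactly c.toNat - 48 (exact on '0'..'9').
def digitsOf (n : Int) : List Int :=
  (PySem.Int.toStr n).toList.map (fun c => (c.toNat : Int) - 48)

-- the index loop `while i+1 < len(d) and d[i] < d[i+1]: i += 1` as recursion on the suffix at i
def climbAlt : List Int → List Int
  | a :: b :: r => if a < b then climbAlt (b :: r) else a :: b :: r
  | l => l

-- `all(d[j] > d[j+1] for j in range(i, len(d)-1))` on the suffix at i
def descAlt : List Int → Bool
  | a :: b :: r => decide (a > b) && descAlt (b :: r)
  | _ => true

def check_alt (n : Int) : Bool :=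
  if n < 100 then false
  else descAlt (climbAlt (digitsOf n))

-- ===== PRECONDITION & SPEC =====
-- Pre_check: math.log(n, 10) raises ValueError for n ≤ 0, so A returns exactly on n ≥ 1.
def Pre_check (n : Int) : Prop := 1 ≤ n
instance (n : Int) : Decidable (Pre_check n) := by unfold Pre_check; infer_instance
def pvWitness_check : Int := 121

def Spec_check (n : Int) (out : Bool) : Prop := out = check_alt n
instance (n : Int) (out : Bool) : Decidable (Spec_check n out) := by unfold Spec_check; infer_instance

-- ===== CLAIM (what is proved, stated in full; the proofs are below) =====
def Claim_equal_check : Prop := ∀ (n : Int), Dom_check n → Pre_check n → Spec_check n (check n)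

-- ===== LEMMAS AND PROOFS =====

-- the comparison sign of two digits
def cmpd (a b : Int) : Ordering := if a < b then .lt else if b < a then .gt else .eq

-- the list of adjacent comparison signs of a list
def cmps : List Int → List Ordering
  | a :: b :: r => cmpd a b :: cmps (b :: r)
  | _ => []

-- "some strict increases, then only strict decreases"
def okc (cs : List Ordering) : Bool := (cs.dropWhile (· == Ordering.lt)).all (· == Ordering.gt)

-- the digits of m, least significant first, as Ints
def irdig (m : Nat) : List Int :=
  if h : m = 0 then [] else ((m % 10 : Nat) : Int) :: irdig (m / 10)
  decreasing_by exact Nat.div_lt_self (Nat.pos_of_ne_zero h) (by norm_num)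

-- the digit characters of m, least significant first (what Nat.toDigits reverses)
def crdig (m : Nat) : List Char :=
  (m % 10).digitChar :: (if h : m / 10 = 0 then [] else crdig (m / 10))
  decreasing_by
    exact Nat.div_lt_self (Nat.pos_of_ne_zero (fun hm => h (by simp [hm]))) (by norm_num)

-- A's two loops as pure functions on the digit list (least significant first)
def g2 : Int → List Int → Bool
  | _, [] => true
  | last, b :: r => if last - b > 0 then g2 b r else false

def g1 : Int → List Int → Bool
  | _, [] => true
  | last, b :: r => if last - b < 0 then g1 b r else g2 last (b :: r)

lemma mod_nat (m : Nat) : PySem.Int.mod (m : Int) 10 = ((m % 10 : Nat) : Int) := by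
  exact_mod_cast PySem.Int.mod_natCast m 10

lemma div_nat (m : Nat) : PySem.Int.floordiv (m : Int) 10 = ((m / 10 : Nat) : Int) := by
  exact_mod_cast PySem.Int.floordiv_natCast m 10

lemma irdig_pos {m : Nat} (h : m ≠ 0) :
    irdig m = ((m % 10 : Nat) : Int) :: irdig (m / 10) := by
  rw [irdig]; simp [h]

lemma phase2_eq : ∀ (fuel m : Nat) (last : Int), m < fuel →
    checkPhase2 fuel last (m : Int) = g2 last (irdig m) := by
  intro fuel
  induction fuel with
  | zero => intro m last h; omega
  | succ f ih =>
    intro m last h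
    by_cases hm : m = 0
    · subst hm; simp [checkPhase2, irdig, g2]
    · have hne : (m : Int) ≠ 0 := by exact_mod_cast hm
      have hdm : m / 10 < m := Nat.div_lt_self (Nat.pos_of_ne_zero hm) (by norm_num)
      rw [checkPhase2, if_pos hne, mod_nat, div_nat, irdig_pos hm, g2]
      by_cases hc : last - ((m % 10 : Nat) : Int) > 0
      · rw [if_neg (not_not_intro hc), if_pos hc, ih (m / 10) _ (by omega)]
      · rw [if_pos hc, if_neg hc]

lemma phase1_eq : ∀ (fuel1 m fuel2 : Nat) (last : Int), m < fuel1 → m < fuel2 →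
    (if (checkPhase1 fuel1 last (m : Int)).1 = -1 then
        checkPhase2 fuel2 (checkPhase1 fuel1 last (m : Int)).2.1
          (checkPhase1 fuel1 last (m : Int)).2.2
      else true) = g1 last (irdig m) := by
  intro fuel1
  induction fuel1 with
  | zero => intro m fuel2 last h _; omega
  | succ f ih =>
    intro m fuel2 last h h2
    by_cases hm : m = 0
    · subst hm; simp [checkPhase1, irdig, g1]
    · have hne : (m : Int) ≠ 0 := by exact_mod_cast hm
      have hdm : m / 10 < m := Nat.div_lt_self (Nat.pos_of_ne_zero hm) (by norm_num)
      rw [checkPhase1, if_pos hne, mod_nat, div_nat, irdig_pos hm, g1]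
      by_cases hc : last - ((m % 10 : Nat) : Int) < 0
      · rw [if_neg (not_not_intro hc), if_pos hc]
        exact ih (m / 10) fuel2 _ (by omega) (by omega)
      · rw [if_pos hc, if_neg hc]
        show (if (-1 : Int) = -1 then checkPhase2 fuel2 last ((m : Nat) : Int) else true) =
          g2 last (((m % 10 : Nat) : Int) :: irdig (m / 10))
        rw [if_pos rfl, phase2_eq fuel2 m last h2, irdig_pos hm]

lemma g2_all : ∀ (l : List Int) (last : Int), g2 last l = (cmps (last :: l)).all (· == Ordering.gt) := by
  intro l
  induction l with
  | nil => intro last; simp [g2, cmps]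
  | cons b r ih =>
    intro last
    rw [g2, cmps]
    by_cases hc : last - b > 0
    · have hgt : cmpd last b = .gt := by unfold cmpd; split_ifs with h1 h2 <;> first | rfl | omega
      rw [if_pos hc, ih b, List.all_cons, hgt]
      simp
    · have hgt : (cmpd last b == Ordering.gt) = false := by
        unfold cmpd; split_ifs with h1 h2 <;> simp_all <;> omega
      rw [if_neg hc, List.all_cons, hgt, Bool.false_and]

lemma g1_okc : ∀ (l : List Int) (last : Int), g1 last l = okc (cmps (last :: l)) := by
  intro l
  induction l with
  | nil => intro last; simp [g1, cmps, okc]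
  | cons b r ih =>
    intro last
    rw [g1, cmps]
    by_cases hc : last - b < 0
    · have : cmpd last b = .lt := by unfold cmpd; split_ifs with h1 h2 <;> first | rfl | omega
      simp only [hc, if_true, ih b, okc, this, List.dropWhile_cons]
      simp [cmps]
    · have hne : cmpd last b ≠ .lt := by unfold cmpd; split_ifs with h1 h2 <;> simp <;> omega
      rw [if_neg hc, g2_all]
      simp only [okc, cmps, List.dropWhile_cons]
      simp [hne]

lemma desc_all : ∀ l : List Int, descAlt l = (cmps l).all (· == Ordering.gt) := by
  intro l
  induction l using descAlt.induct with
  | case1 a b r ih =>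
    rw [descAlt, cmps]
    have : decide (a > b) = (cmpd a b == Ordering.gt) := by
      unfold cmpd; split_ifs with h1 h2 <;> simp <;> omega
    simp [this, ih]
  | case2 l h => cases l with
    | nil => simp [descAlt, cmps]
    | cons a t => cases t with
      | nil => simp [descAlt, cmps]
      | cons b r => exact absurd rfl (h a b r)

lemma climb_okc : ∀ l : List Int, descAlt (climbAlt l) = okc (cmps l) := by
  intro l
  induction l using climbAlt.induct with
  | case1 a b r hab ih =>
    have : cmpd a b = .lt := by unfold cmpd; split_ifs with h1 h2 <;> first | rfl | omega
    rw [climbAlt, if_pos hab, ih]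
    simp only [okc, cmps, List.dropWhile_cons, this]
    simp
  | case2 a b r hab =>
    have hne : cmpd a b ≠ .lt := by unfold cmpd; split_ifs with h1 h2 <;> simp <;> omega
    rw [climbAlt, if_neg hab, desc_all]
    simp only [okc, cmps, List.dropWhile_cons]
    simp [hne]
  | case3 l h => cases l with
    | nil => simp [climbAlt, descAlt, cmps, okc]
    | cons a t => cases t with
      | nil => simp [climbAlt, descAlt, cmps, okc]
      | cons b r => exact absurd rfl (h a b r)

lemma cmpd_swap (a b : Int) : cmpd b a = (cmpd a b).swap := by
  unfold cmpd; split_ifs with h1 h2 h3 h4 h5 h6 <;> first | rfl | omega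

lemma cmps_snoc : ∀ (l : List Int) (a : Int),
    cmps (l ++ [a]) = cmps l ++ (l.getLast?.map (fun x => cmpd x a)).toList := by
  intro l
  induction l using cmps.induct with
  | case1 x y r ih =>
    intro a
    simp only [List.cons_append] at ih ⊢
    rw [show cmps (x :: y :: (r ++ [a])) = cmpd x y :: cmps (y :: (r ++ [a])) from rfl,
      show cmps (x :: y :: r) = cmpd x y :: cmps (y :: r) from rfl,
      List.getLast?_cons_cons, List.cons_append]
    rw [← ih a]
  | case2 l h => cases l with
    | nil => intro a; simp [cmps]
    | cons x t => cases t with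
      | nil => intro a; simp [cmps]
      | cons y r => exact absurd rfl (h x y r)

lemma cmps_reverse : ∀ l : List Int, cmps l.reverse = ((cmps l).map Ordering.swap).reverse := by
  intro l
  induction l with
  | nil => simp [cmps]
  | cons a l ih =>
    rw [List.reverse_cons, cmps_snoc, ih, List.getLast?_reverse]
    cases l with
    | nil => simp [cmps]
    | cons b r =>
      simp only [List.head?_cons, Option.map_some, Option.toList_some, cmps, List.map_cons,
        List.reverse_cons]
      rw [cmpd_swap]

lemma okc_iff : ∀ cs : List Ordering, okc cs = true ↔
    ∃ a b, cs = List.replicate a Ordering.lt ++ List.replicate b Ordering.gt := by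
  intro cs
  induction cs with
  | nil => exact ⟨fun _ => ⟨0, 0, rfl⟩, fun _ => rfl⟩
  | cons c cs ih =>
    by_cases hc : c = Ordering.lt
    · subst hc
      have hstep : okc (Ordering.lt :: cs) = okc cs := by simp [okc]
      rw [hstep, ih]
      constructor
      · rintro ⟨a, b, rfl⟩
        exact ⟨a + 1, b, by simp [List.replicate_succ]⟩
      · rintro ⟨a, b, h⟩
        cases a with
        | zero =>
          cases b with
          | zero => simp at h
          | succ b' => simp [List.replicate_succ] at h
        | succ a' =>
          simp only [List.replicate_succ, List.cons_append, List.cons.injEq] at h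
          exact ⟨a', b, h.2⟩
    · have hstep : okc (c :: cs) = ((c == Ordering.gt) && cs.all (· == Ordering.gt)) := by
        simp [okc, List.dropWhile_cons, hc]
      rw [hstep]
      constructor
      · intro h
        simp only [Bool.and_eq_true, beq_iff_eq, List.all_eq_true] at h
        refine ⟨0, cs.length + 1, ?_⟩
        simp only [List.replicate_zero, List.nil_append, List.replicate_succ, List.cons.injEq]
        exact ⟨h.1, (List.eq_replicate_length).mpr h.2⟩
      · rintro ⟨a, b, h⟩
        cases a with
        | succ a' => simp [List.replicate_succ] at h; exact absurd h.1 hc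
        | zero =>
          cases b with
          | zero => simp at h
          | succ b' =>
            simp only [List.replicate_zero, List.nil_append, List.replicate_succ,
              List.cons.injEq] at h
            simp [h.1, h.2, List.all_eq_true, List.mem_replicate]

lemma okc_reverse_swap (cs : List Ordering) : okc ((cs.map Ordering.swap).reverse) = okc cs := by
  rw [Bool.eq_iff_iff, okc_iff, okc_iff]
  constructor
  · rintro ⟨a, b, h⟩
    refine ⟨b, a, ?_⟩
    have := congrArg (fun l => (List.map Ordering.swap l).reverse) h
    simpa [List.map_map, Function.comp_def, Ordering.swap_swap] using this
  · rintro ⟨a, b, rfl⟩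
    exact ⟨b, a, by simp⟩

lemma crdig_unfold (m : Nat) :
    crdig m = (m % 10).digitChar :: (if h : m / 10 = 0 then [] else crdig (m / 10)) := by
  rw [crdig]

lemma toDigitsCore_eq : ∀ (f m : Nat) (ds : List Char), m < f →
    Nat.toDigitsCore 10 f m ds = (crdig m).reverse ++ ds := by
  intro f
  induction f with
  | zero => intro m ds h; omega
  | succ f ih =>
    intro m ds h
    rw [Nat.toDigitsCore]
    by_cases h0 : m / 10 = 0
    · simp only [h0, if_true]
      rw [crdig_unfold m, dif_pos h0]
      simp
    · simp only [h0, if_false]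
      have hm : m ≠ 0 := fun hm => h0 (by simp [hm])
      have hlt : m / 10 < m := Nat.div_lt_self (Nat.pos_of_ne_zero hm) (by norm_num)
      rw [ih (m / 10) _ (by omega), crdig_unfold m, dif_neg h0, List.reverse_cons,
        List.append_assoc, List.singleton_append]

lemma toDigits_eq (m : Nat) : Nat.toDigits 10 m = (crdig m).reverse := by
  show Nat.toDigitsCore 10 (m + 1) m [] = (crdig m).reverse
  rw [toDigitsCore_eq (m + 1) m [] (by omega)]; simp

lemma dval_digitChar (k : Nat) (h : k < 10) :
    ((Nat.digitChar k).toNat : Int) - 48 = (k : Int) := by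
  interval_cases k <;> decide

lemma map_crdig : ∀ m : Nat, m ≠ 0 →
    (crdig m).map (fun c => (c.toNat : Int) - 48) = irdig m := by
  intro m
  induction m using Nat.strong_induction_on with
  | _ m ih =>
    intro hm
    rw [crdig_unfold m, irdig_pos hm, List.map_cons, dval_digitChar _ (Nat.mod_lt _ (by norm_num))]
    by_cases h0 : m / 10 = 0
    · rw [dif_pos h0, h0]
      simp [irdig]
    · have hlt : m / 10 < m := Nat.div_lt_self (Nat.pos_of_ne_zero hm) (by norm_num)
      rw [dif_neg h0, ih (m / 10) hlt h0]

lemma digitsOf_eq {n : Int} (h : 1 ≤ n) : digitsOf n = (irdig n.toNat).reverse := by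
  have hm : n.toNat ≠ 0 := by omega
  rw [digitsOf, PySem.Int.toList_toStr, PySem.Int.toChars, if_neg (by omega), toDigits_eq,
    List.map_reverse, map_crdig n.toNat hm]

lemma check_eq_okc {n : Int} (h : ¬ n < 100) :
    check n = okc (cmps (irdig n.toNat)) := by
  have hn : ((n.toNat : Nat) : Int) = n := by omega
  have habs : n.natAbs = n.toNat := by omega
  have hm : n.toNat ≠ 0 := by omega
  have hdm : n.toNat / 10 < n.toNat := Nat.div_lt_self (Nat.pos_of_ne_zero hm) (by norm_num)
  have e1 : PySem.Int.mod n 10 = ((n.toNat % 10 : Nat) : Int) := by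
    conv_lhs => rw [← hn]
    rw [mod_nat]
  have e2 : PySem.Int.floordiv n 10 = ((n.toNat / 10 : Nat) : Int) := by
    conv_lhs => rw [← hn]
    rw [div_nat]
  rw [check, if_neg h, habs, e1, e2]
  rw [phase1_eq (n.toNat + 1) (n.toNat / 10) (n.toNat + 1) _ (by omega) (by omega)]
  rw [g1_okc, ← irdig_pos hm]

lemma check_alt_eq_okc {n : Int} (h : ¬ n < 100) (h1 : 1 ≤ n) :
    check_alt n = okc (cmps ((irdig n.toNat).reverse)) := by
  rw [check_alt, if_neg h, digitsOf_eq h1, climb_okc]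

-- ===== VERDICT (by name: the statement is the Claim_ definition above) =====
theorem check_spec : Claim_equal_check := by
  intro n _ hpre
  show check n = check_alt n
  by_cases h : n < 100
  · rw [check, check_alt, if_pos h, if_pos h]
  · rw [check_eq_okc h, check_alt_eq_okc h hpre, cmps_reverse, okc_reverse_swap]
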